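-- pv_equiv track=rewrite | github.com/sean-m-higgins/ZTextMiningPy | src/ZettelPreProcessor.py | create_unique_corpus
-- ===== SOURCE A (Python) =====
-- def create_unique_corpus(tokens):
-- 	unique = []
-- 	for word in tokens:
-- 		if word not in unique:
-- 			unique.append(word)
-- 	unique = list(filter(None, unique))
-- 	unique.sort()
-- 	return unique
-- ===== SOURCE B (Python) =====
-- def create_unique_corpus(tokens):
--     out = []
--     prev = None
--     for w in sorted(tokens):
--         if w and w != prev:
--             out.append(w)
--             prev = w
--     return out
-- ===== Notes on version B (the rewrite author's own statement) =====
-- stated objective: faster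
-- what changed: A dedups by an O(n) membership scan into a growing list and sorts afterwards; B sorts first and removes falsy/adjacent-duplicate tokens in one linear pass with only the previously kept value.
import Mathlib
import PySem

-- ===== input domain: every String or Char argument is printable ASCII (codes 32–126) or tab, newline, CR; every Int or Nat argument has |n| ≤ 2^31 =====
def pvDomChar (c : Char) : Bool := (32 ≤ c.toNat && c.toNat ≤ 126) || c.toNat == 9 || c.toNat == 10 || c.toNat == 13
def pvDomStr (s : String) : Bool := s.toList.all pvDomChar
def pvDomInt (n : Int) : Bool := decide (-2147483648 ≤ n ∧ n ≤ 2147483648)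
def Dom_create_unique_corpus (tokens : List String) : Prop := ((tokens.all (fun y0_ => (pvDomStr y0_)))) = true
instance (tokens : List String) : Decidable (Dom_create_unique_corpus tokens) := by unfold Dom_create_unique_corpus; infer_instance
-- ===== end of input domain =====

-- B sorts first and drops falsy/adjacent-duplicate tokens in one linear pass (vs A's
-- membership-scan dedup followed by a sort); objective: faster.

-- ===== PORT A =====
-- loop body: 'if word not in unique: unique.append(word)'
def astep_create_unique_corpus (u : List String) (w : String) : List String :=
  if w ∈ u then u else u ++ [w]

def create_unique_corpus (tokens : List String) : List String :=
  let unique := tokens.foldl astep_create_unique_corpus []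
  -- filter(None, unique): a string is truthy iff it is nonempty
  let unique2 := unique.filter (fun s => s ≠ "")
  PySem.List.sorted unique2 (fun x => x) false

-- ===== PORT B =====
-- loop body: 'if w and w != prev: out.append(w); prev = w'  (state = (out, prev))
def bstep_create_unique_corpus (st : List String × Option String) (w : String) :
    List String × Option String :=
  if w ≠ "" ∧ st.2 ≠ some w then (st.1 ++ [w], some w) else st

def create_unique_corpus_alt (tokens : List String) : List String :=
  ((PySem.List.sorted tokens (fun x => x) false).foldl bstep_create_unique_corpus
    ([], (none : Option String))).1

-- ===== PRECONDITION & SPEC =====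
def Spec_create_unique_corpus (tokens : List String) (out : List String) : Prop := out = create_unique_corpus_alt tokens
instance (tokens : List String) (out : List String) : Decidable (Spec_create_unique_corpus tokens out) := by unfold Spec_create_unique_corpus; infer_instance

-- ===== CLAIM (what is proved, stated in full; the proofs are below) =====
def Claim_equal_create_unique_corpus : Prop := ∀ (tokens : List String), Dom_create_unique_corpus tokens → Spec_create_unique_corpus tokens (create_unique_corpus tokens)

-- ===== LEMMAS AND PROOFS =====

-- A's dedup loop: keeps the accumulator duplicate-free and collects exactly acc ∪ l.
lemma aloop_spec (l : List String) : ∀ (acc : List String), acc.Nodup →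
    (l.foldl astep_create_unique_corpus acc).Nodup ∧
    ∀ x, x ∈ l.foldl astep_create_unique_corpus acc ↔ x ∈ acc ∨ x ∈ l := by
  induction l with
  | nil => intro acc h; simpa using h
  | cons w t ih =>
    intro acc hacc
    by_cases hw : w ∈ acc
    · have := ih acc hacc
      simp only [List.foldl_cons, astep_create_unique_corpus, if_pos hw]
      refine ⟨this.1, fun x => ?_⟩
      rw [this.2 x]
      constructor
      · rintro (h | h) <;> simp [h]
      · rintro (h | h)
        · exact Or.inl h
        · rcases List.mem_cons.mp h with h | h
          · exact Or.inl (h ▸ hw)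
          · exact Or.inr h
    · have hnd : (acc ++ [w]).Nodup := by
        refine List.Nodup.append hacc (List.nodup_singleton w) ?_
        intro a ha hb
        rcases List.mem_singleton.mp hb with rfl
        exact hw ha
      have := ih (acc ++ [w]) hnd
      simp only [List.foldl_cons, astep_create_unique_corpus, if_neg hw]
      refine ⟨this.1, fun x => ?_⟩
      rw [this.2 x]
      simp [List.mem_append, List.mem_cons, or_assoc, or_comm, or_left_comm]

-- in a strictly increasing list every element is ≤ the last one
lemma le_getLast_of_pairwise : ∀ (out : List String) (p : String),
    out.Pairwise (· < ·) → out.getLast? = some p → ∀ x ∈ out, x ≤ p := by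
  intro out
  induction out with
  | nil => intro p _ h; simp at h
  | cons a t ih =>
    intro p hp hl x hx
    rcases List.pairwise_cons.mp hp with ⟨ha, ht⟩
    cases t with
    | nil =>
      have hp : a = p := by simpa using hl
      have hx' : x = a := by simpa using hx
      exact le_of_eq (by rw [hx', hp])
    | cons b u =>
      have hl' : (b :: u).getLast? = some p := by
        simpa [List.getLast?_cons_cons] using hl
      rcases List.mem_cons.mp hx with h | h
      · subst h
        have hb : x < b := ha b (by simp)
        have := ih p ht hl' b (by simp)
        exact le_trans (le_of_lt hb) this
      · exact ih p ht hl' x h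

-- B's pass: invariant for the fold over a ≤-sorted list
lemma bloop_spec (l : List String) : ∀ (out : List String) (prev : Option String),
    l.Pairwise (· ≤ ·) → out.Pairwise (· < ·) → prev = out.getLast? →
    (∀ x ∈ out, ∀ y ∈ l, x ≤ y) →
    (l.foldl bstep_create_unique_corpus (out, prev)).1.Pairwise (· < ·) ∧
    ∀ x, x ∈ (l.foldl bstep_create_unique_corpus (out, prev)).1 ↔
      x ∈ out ∨ (x ∈ l ∧ x ≠ "") := by
  induction l with
  | nil => intro out prev _ hout _ _; simpa using hout
  | cons w t ih =>
    intro out prev hl hout hprev hbd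
    rcases List.pairwise_cons.mp hl with ⟨hwle, ht⟩
    by_cases hc : w ≠ "" ∧ prev ≠ some w
    · -- append case
      have hlt : ∀ x ∈ out, x < w := by
        intro x hx
        have hle : x ≤ w := hbd x hx w (by simp)
        rcases lt_or_eq_of_le hle with h | h
        · exact h
        · exfalso
          subst h
          cases hpv : out.getLast? with
          | none =>
            have : out = [] := List.getLast?_eq_none_iff.mp hpv
            simp [this] at hx
          | some p =>
            have h1 : x ≤ p := le_getLast_of_pairwise out p hout hpv x hx
            have hpmem : p ∈ out := List.mem_of_getLast? hpv
            have h2 : p ≤ x := hbd p hpmem x (by simp)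
            have : p = x := le_antisymm h2 h1
            exact hc.2 (by rw [hprev, hpv, this])
      have hnd : (out ++ [w]).Pairwise (· < ·) := by
        rw [List.pairwise_append]
        exact ⟨hout, by simp, by simpa using hlt⟩
      have hstep : bstep_create_unique_corpus (out, prev) w = (out ++ [w], some w) := by
        simp [bstep_create_unique_corpus, hc]
      have hbd' : ∀ x ∈ out ++ [w], ∀ y ∈ t, x ≤ y := by
        intro x hx y hy
        rcases List.mem_append.mp hx with h | h
        · exact hbd x h y (by simp [hy])
        · rcases List.mem_singleton.mp h with h
          exact h ▸ hwle y hy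
      have := ih (out ++ [w]) (some w) ht hnd (by simp) hbd'
      simp only [List.foldl_cons, hstep]
      refine ⟨this.1, fun x => ?_⟩
      rw [this.2 x]
      constructor
      · rintro (h | h)
        · rcases List.mem_append.mp h with h | h
          · exact Or.inl h
          · rcases List.mem_singleton.mp h with h
            exact Or.inr ⟨h ▸ by simp, h ▸ hc.1⟩
        · exact Or.inr ⟨List.mem_cons_of_mem _ h.1, h.2⟩
      · rintro (h | ⟨h1, h2⟩)
        · exact Or.inl (List.mem_append.mpr (Or.inl h))
        · rcases List.mem_cons.mp h1 with h | h
          · exact Or.inl (List.mem_append.mpr (Or.inr (by simp [h])))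
          · exact Or.inr ⟨h, h2⟩
    · -- skip case
      have hstep : bstep_create_unique_corpus (out, prev) w = (out, prev) := by
        simp only [bstep_create_unique_corpus]
        rw [if_neg hc]
      have hbd' : ∀ x ∈ out, ∀ y ∈ t, x ≤ y := fun x hx y hy => hbd x hx y (by simp [hy])
      have := ih out prev ht hout hprev hbd'
      simp only [List.foldl_cons, hstep]
      refine ⟨this.1, fun x => ?_⟩
      rw [this.2 x]
      constructor
      · rintro (h | h)
        · exact Or.inl h
        · exact Or.inr ⟨List.mem_cons_of_mem _ h.1, h.2⟩
      · rintro (h | ⟨h1, h2⟩)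
        · exact Or.inl h
        · rcases List.mem_cons.mp h1 with h | h
          · -- x = w: then w ≠ "" (from h2), so prev = some w; w is the last of out
            subst h
            rcases not_and_or.mp hc with h | h
            · exact absurd h2 (by simpa using h)
            · have hpv : out.getLast? = some x := by
                rw [← hprev]
                simpa using h
              exact Or.inl (List.mem_of_getLast? hpv)
          · exact Or.inr ⟨h, h2⟩

-- ===== VERDICT (by name: the statement is the Claim_ definition above) =====
theorem create_unique_corpus_spec : Claim_equal_create_unique_corpus := by
  intro tokens _
  unfold Spec_create_unique_corpus create_unique_corpus create_unique_corpus_alt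
  have hA := aloop_spec tokens [] List.nodup_nil
  set U := tokens.foldl astep_create_unique_corpus [] with hU
  set F := U.filter (fun s => decide (s ≠ "")) with hF
  have hFnd : F.Nodup := hA.1.filter _
  have hFmem : ∀ x, x ∈ F ↔ x ∈ tokens ∧ x ≠ "" := by
    intro x
    rw [hF, List.mem_filter]
    have := hA.2 x
    simp at this
    simp [this]
  have hs : (PySem.List.sorted tokens (fun x => x) false).Pairwise (· ≤ ·) := by
    simpa using PySem.List.sorted_pairwise tokens (fun x => x)
  have hB := bloop_spec (PySem.List.sorted tokens (fun x => x) false) [] none hs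
    List.Pairwise.nil (by simp) (by simp)
  set R := ((PySem.List.sorted tokens (fun x => x) false).foldl bstep_create_unique_corpus
    ([], none)).1 with hR
  have hRlt : R.Pairwise (· < ·) := hB.1
  have hRnd : R.Nodup := hRlt.imp (fun h => ne_of_lt h)
  have hRmem : ∀ x, x ∈ R ↔ x ∈ tokens ∧ x ≠ "" := by
    intro x
    rw [hB.2 x]
    simp [PySem.List.mem_sorted]
  have hperm : R.Perm F :=
    (List.perm_ext_iff_of_nodup hRnd hFnd).mpr (fun a => by rw [hRmem a, hFmem a])
  exact PySem.List.sorted_eq_of_perm_of_pairwise_lt F R (fun x => x) hperm hRlt
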